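-- pv_equiv track=rewrite | github.com/rainbownyashka/mldsl | tools/extract_regallactions_args.py | find_candidate_slot_v2
-- ===== SOURCE A (Python) =====
-- GLASS_ID = "minecraft:stained_glass_pane"
--
-- ROW_SIZE = 9
--
-- INPUT_ITEM_BY_MODE: dict[str, list[str]] = {
--     "TEXT": ["minecraft:book"],
--     "NUMBER": ["minecraft:slime_ball"],
--     "VARIABLE": ["minecraft:magma_cream"],
--     "ARRAY": ["minecraft:item_frame"],
--     "LOCATION": ["minecraft:paper"],
--     "VECTOR": [],
-- }
--
-- def neighbor_slots(slot: int, max_row: int):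
--     row = slot // ROW_SIZE
--     col = slot % ROW_SIZE
--     order = [
--         (row + 1, col),  # down
--         (row, col - 1),  # left
--         (row, col + 1),  # right
--         (row - 1, col),  # up
--     ]
--     for r, c in order:
--         # AGENT_TAG: merged_pages_neighbors
--         # Support merged multi-page exports where slots go beyond a single 6-row chest page.
--         if 0 <= r <= max_row and 0 <= c < ROW_SIZE:
--             yield r * ROW_SIZE + c
--
-- def find_candidate_slot_v2(items: dict, base_slot: int, reserved: set[int], mode: str, max_row: int) -> int | None:
--     """
--     Pick the slot the UI would edit/fill for this glass marker.
--
--     Order (close to the in-mod logic):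
--     1) If a neighbor slot already contains the expected input item for this mode, use it (edit).
--     2) Otherwise pick the first empty neighbor slot (new value).
--     3) For ITEM mode only: if no empty slots exist, allow the first non-glass neighbor slot.
--
--     We intentionally do NOT use generic "occupied non-glass" fallback for other modes, because
--     it can accidentally bind enum items (e.g. rope) that live in the GUI layout.
--     """
--     expected_ids = INPUT_ITEM_BY_MODE.get(mode, [])
--     if expected_ids:
--         for s in neighbor_slots(base_slot, max_row):
--             if s in reserved:
--                 continue
--             it = items.get(s)
--             if not it:
--                 continue
--             if it.get("id") in expected_ids:
--                 return s
--
--     for s in neighbor_slots(base_slot, max_row):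
--         if s in reserved:
--             continue
--         if s not in items:
--             return s
--
--     if mode in {"ITEM", "BLOCK"}:
--         for s in neighbor_slots(base_slot, max_row):
--             if s in reserved:
--                 continue
--             it = items.get(s)
--             if not it:
--                 continue
--             if it.get("id") != GLASS_ID:
--                 return s
--
--     return None
-- ===== SOURCE B (Python) =====
-- GLASS_ID = "minecraft:stained_glass_pane"
--
-- ROW_SIZE = 9
--
-- INPUT_ITEM_BY_MODE = {
--     "TEXT": ["minecraft:book"],
--     "NUMBER": ["minecraft:slime_ball"],
--     "VARIABLE": ["minecraft:magma_cream"],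
--     "ARRAY": ["minecraft:item_frame"],
--     "LOCATION": ["minecraft:paper"],
--     "VECTOR": [],
-- }
--
--
-- def neighbor_slots(slot, max_row):
--     row = slot // ROW_SIZE
--     col = slot % ROW_SIZE
--     order = [(row + 1, col), (row, col - 1), (row, col + 1), (row - 1, col)]
--     for r, c in order:
--         if 0 <= r <= max_row and 0 <= c < ROW_SIZE:
--             yield r * ROW_SIZE + c
--
--
-- def find_candidate_slot_v2(items, base_slot, reserved, mode, max_row):
--     """Single pass over the neighbors, keeping the first candidate of each tier,
--     then resolving the priority after the scan."""
--     expected_ids = INPUT_ITEM_BY_MODE.get(mode, [])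
--     exp_match = empty_slot = fallback = None
--     for s in neighbor_slots(base_slot, max_row):
--         if s in reserved:
--             continue
--         if s not in items:
--             if empty_slot is None:
--                 empty_slot = s
--             continue
--         it = items[s]
--         if not it:
--             continue
--         if exp_match is None and it.get("id") in expected_ids:
--             exp_match = s
--         if fallback is None and it.get("id") != GLASS_ID:
--             fallback = s
--     if exp_match is not None:
--         return exp_match
--     if empty_slot is not None:
--         return empty_slot
--     if mode in {"ITEM", "BLOCK"}:
--         return fallback
--     return None
-- ===== Notes on version B (the rewrite author's own statement) =====
-- stated objective: alternative
-- what changed: Replaced A's three sequential scans over the neighbor list with a single fused pass that records the first expected-item match, first empty slot and first non-glass fallback, resolving the tier priority after the scan.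
import Mathlib
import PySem

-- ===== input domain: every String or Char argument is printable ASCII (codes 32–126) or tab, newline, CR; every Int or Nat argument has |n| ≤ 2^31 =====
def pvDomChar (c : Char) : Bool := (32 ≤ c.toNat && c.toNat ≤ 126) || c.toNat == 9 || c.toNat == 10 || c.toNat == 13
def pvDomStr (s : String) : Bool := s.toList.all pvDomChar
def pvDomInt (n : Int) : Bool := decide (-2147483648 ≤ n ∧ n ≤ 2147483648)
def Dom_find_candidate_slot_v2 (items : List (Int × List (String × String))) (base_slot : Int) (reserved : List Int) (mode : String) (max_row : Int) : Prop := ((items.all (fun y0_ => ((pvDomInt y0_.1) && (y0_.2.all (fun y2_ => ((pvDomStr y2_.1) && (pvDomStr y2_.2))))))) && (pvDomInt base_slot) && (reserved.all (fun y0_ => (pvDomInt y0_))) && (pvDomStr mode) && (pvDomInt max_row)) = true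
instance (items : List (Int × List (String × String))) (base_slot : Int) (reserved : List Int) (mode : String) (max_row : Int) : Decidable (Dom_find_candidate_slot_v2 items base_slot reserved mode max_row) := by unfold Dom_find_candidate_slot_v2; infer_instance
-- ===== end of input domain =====

-- ===== PORT A =====
-- B fuses A's three sequential neighbor scans into one pass with three first-seen
-- candidates resolved afterwards (objective: alternative/simpler control flow).

-- first-match association-list lookup (Python dict .get on the assoc-list encoding)
def fcsGet? {K V : Type} [BEq K] (d : List (K × V)) (k : K) : Option V :=
  (d.find? (fun p => p.1 == k)).map (·.2)

def fcsGlass : String := "minecraft:stained_glass_pane"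

-- INPUT_ITEM_BY_MODE.get(mode, [])
def fcsExpected (mode : String) : List String :=
  if mode = "TEXT" then ["minecraft:book"]
  else if mode = "NUMBER" then ["minecraft:slime_ball"]
  else if mode = "VARIABLE" then ["minecraft:magma_cream"]
  else if mode = "ARRAY" then ["minecraft:item_frame"]
  else if mode = "LOCATION" then ["minecraft:paper"]
  else if mode = "VECTOR" then []
  else []

-- neighbor_slots(slot, max_row): the generator materialised as a list
def fcsNeighbors (slot : Int) (max_row : Int) : List Int :=
  let row := PySem.Int.floordiv slot 9
  let col := PySem.Int.mod slot 9
  let order : List (Int × Int) := [(row + 1, col), (row, col - 1), (row, col + 1), (row - 1, col)]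
  order.filterMap (fun rc =>
    if 0 ≤ rc.1 ∧ rc.1 ≤ max_row ∧ 0 ≤ rc.2 ∧ rc.2 < 9 then some (rc.1 * 9 + rc.2) else none)

-- A, tier 1: first neighbor whose item id is in expected_ids
def fcsLoop1 (items : List (Int × List (String × String))) (reserved : List Int)
    (expected : List String) : List Int → Option Int
  | [] => none
  | s :: rest =>
    if s ∈ reserved then fcsLoop1 items reserved expected rest
    else match fcsGet? items s with
      | none => fcsLoop1 items reserved expected rest
      | some it =>
        if it.isEmpty then fcsLoop1 items reserved expected rest
        else match fcsGet? it "id" with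
          | some v => if v ∈ expected then some s else fcsLoop1 items reserved expected rest
          | none => fcsLoop1 items reserved expected rest

-- A, tier 2: first neighbor absent from items
def fcsLoop2 (items : List (Int × List (String × String))) (reserved : List Int) :
    List Int → Option Int
  | [] => none
  | s :: rest =>
    if s ∈ reserved then fcsLoop2 items reserved rest
    else if fcsGet? items s = none then some s
    else fcsLoop2 items reserved rest

-- A, tier 3: first non-empty neighbor whose id is not the glass marker
def fcsLoop3 (items : List (Int × List (String × String))) (reserved : List Int) :
    List Int → Option Int
  | [] => none
  | s :: rest =>
    if s ∈ reserved then fcsLoop3 items reserved rest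
    else match fcsGet? items s with
      | none => fcsLoop3 items reserved rest
      | some it =>
        if it.isEmpty then fcsLoop3 items reserved rest
        else if fcsGet? it "id" ≠ some fcsGlass then some s
        else fcsLoop3 items reserved rest

def find_candidate_slot_v2 (items : List (Int × List (String × String))) (base_slot : Int) (reserved : List Int) (mode : String) (max_row : Int) : Option Int :=
  match (if (fcsExpected mode).isEmpty then none
         else fcsLoop1 items reserved (fcsExpected mode) (fcsNeighbors base_slot max_row)) with
  | some s => some s
  | none =>
    match fcsLoop2 items reserved (fcsNeighbors base_slot max_row) with
    | some s => some s
    | none =>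
      if mode = "ITEM" ∨ mode = "BLOCK" then
        fcsLoop3 items reserved (fcsNeighbors base_slot max_row)
      else none

-- ===== PORT B =====
-- one fused pass: update the three first-seen candidates for a single neighbor s
def fcsStep (items : List (Int × List (String × String))) (reserved : List Int)
    (expected : List String) (st : Option Int × Option Int × Option Int) (s : Int) :
    Option Int × Option Int × Option Int :=
  if s ∈ reserved then st
  else match fcsGet? items s with
    | none => (st.1, (if st.2.1 = none then some s else st.2.1), st.2.2)
    | some it =>
      if it.isEmpty then st
      else
        ((if st.1 = none && (fcsGet? it "id").any (fun v => decide (v ∈ expected))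
          then some s else st.1),
         st.2.1,
         (if st.2.2 = none && decide (fcsGet? it "id" ≠ some fcsGlass) then some s
          else st.2.2))

def find_candidate_slot_v2_alt (items : List (Int × List (String × String))) (base_slot : Int) (reserved : List Int) (mode : String) (max_row : Int) : Option Int :=
  match (fcsNeighbors base_slot max_row).foldl
      (fcsStep items reserved (fcsExpected mode)) (none, none, none) with
  | (expMatch, emptySlot, fallback) =>
    match expMatch with
    | some s => some s
    | none =>
      match emptySlot with
      | some s => some s
      | none => if mode = "ITEM" ∨ mode = "BLOCK" then fallback else none

-- ===== PRECONDITION & SPEC =====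
def Spec_find_candidate_slot_v2 (items : List (Int × List (String × String))) (base_slot : Int) (reserved : List Int) (mode : String) (max_row : Int) (out : Option Int) : Prop := out = find_candidate_slot_v2_alt items base_slot reserved mode max_row
instance (items : List (Int × List (String × String))) (base_slot : Int) (reserved : List Int) (mode : String) (max_row : Int) (out : Option Int) : Decidable (Spec_find_candidate_slot_v2 items base_slot reserved mode max_row out) := by unfold Spec_find_candidate_slot_v2; infer_instance

-- ===== CLAIM (what is proved, stated in full; the proofs are below) =====
def Claim_equal_find_candidate_slot_v2 : Prop := ∀ (items : List (Int × List (String × String))) (base_slot : Int) (reserved : List Int) (mode : String) (max_row : Int), Dom_find_candidate_slot_v2 items base_slot reserved mode max_row → Spec_find_candidate_slot_v2 items base_slot reserved mode max_row (find_candidate_slot_v2 items base_slot reserved mode max_row)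

-- ===== LEMMAS AND PROOFS =====

-- the three tier predicates, as Boolean tests on a single slot
def fcsP1 (items : List (Int × List (String × String))) (reserved : List Int)
    (expected : List String) (s : Int) : Bool :=
  !decide (s ∈ reserved) &&
    (match fcsGet? items s with
     | none => false
     | some it => !it.isEmpty && (fcsGet? it "id").any (fun v => decide (v ∈ expected)))

def fcsP2 (items : List (Int × List (String × String))) (reserved : List Int) (s : Int) : Bool :=
  !decide (s ∈ reserved) && decide (fcsGet? items s = none)

def fcsP3 (items : List (Int × List (String × String))) (reserved : List Int) (s : Int) : Bool :=
  !decide (s ∈ reserved) &&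
    (match fcsGet? items s with
     | none => false
     | some it => !it.isEmpty && decide (fcsGet? it "id" ≠ some fcsGlass))

def fcsOr (a b : Option Int) : Option Int := if a = none then b else a

theorem fcsLoop1_eq_find (items : List (Int × List (String × String))) (reserved : List Int)
    (expected : List String) (L : List Int) :
    fcsLoop1 items reserved expected L = L.find? (fcsP1 items reserved expected) := by
  induction L with
  | nil => rfl
  | cons s rest ih =>
    simp only [fcsLoop1, List.find?_cons, fcsP1]
    by_cases hr : s ∈ reserved
    · simp [hr, ih]
    · cases h : fcsGet? items s with
      | none => simp [hr, h, ih]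
      | some it =>
        by_cases he : it.isEmpty
        · simp [hr, he, ih]
        · cases hid : fcsGet? it "id" with
          | none => simp [hr, he, hid, ih]
          | some v =>
            by_cases hv : v ∈ expected
            · simp [hr, he, hid, hv]
            · simp [hr, he, hid, hv, ih]

theorem fcsLoop2_eq_find (items : List (Int × List (String × String))) (reserved : List Int)
    (L : List Int) :
    fcsLoop2 items reserved L = L.find? (fcsP2 items reserved) := by
  induction L with
  | nil => rfl
  | cons s rest ih =>
    simp only [fcsLoop2, List.find?_cons, fcsP2]
    by_cases hr : s ∈ reserved
    · simp [hr, ih]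
    · by_cases h : fcsGet? items s = none
      · simp [hr, h]
      · simp [hr, h, ih]

theorem fcsLoop3_eq_find (items : List (Int × List (String × String))) (reserved : List Int)
    (L : List Int) :
    fcsLoop3 items reserved L = L.find? (fcsP3 items reserved) := by
  induction L with
  | nil => rfl
  | cons s rest ih =>
    simp only [fcsLoop3, List.find?_cons, fcsP3]
    by_cases hr : s ∈ reserved
    · simp [hr, ih]
    · cases h : fcsGet? items s with
      | none => simp [hr, h, ih]
      | some it =>
        by_cases he : it.isEmpty
        · simp [hr, he, ih]
        · by_cases hid : fcsGet? it "id" = some fcsGlass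
          · simp [hr, he, hid, ih]
          · simp [hr, he, hid]

theorem fcsFoldl_eq (items : List (Int × List (String × String))) (reserved : List Int)
    (expected : List String) (L : List Int) (a b c : Option Int) :
    L.foldl (fcsStep items reserved expected) (a, b, c) =
      (fcsOr a (L.find? (fcsP1 items reserved expected)),
       fcsOr b (L.find? (fcsP2 items reserved)),
       fcsOr c (L.find? (fcsP3 items reserved))) := by
  induction L generalizing a b c with
  | nil => simp [fcsOr]
  | cons s rest ih =>
    simp only [List.foldl_cons, List.find?_cons, fcsStep, fcsP1, fcsP2, fcsP3]
    by_cases hr : s ∈ reserved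
    · simp only [hr, decide_true, Bool.not_true, Bool.false_and, if_true,
        Bool.false_eq_true, if_neg, ih]
    · cases h : fcsGet? items s with
      | none =>
        simp only [hr, decide_false, Bool.not_false, Bool.true_and, h, if_neg, ih,
          decide_eq_true_eq]
        cases b <;> simp [fcsOr]
      | some it =>
        cases he : it.isEmpty with
        | true =>
          simp only [hr, h, he, if_pos, if_neg, ih]
          simp [fcsOr]
        | false =>
          simp only [he, Bool.not_false, Bool.true_and]
          cases hid : fcsGet? it "id" with
          | none =>
            cases a <;> cases c <;> simp_all [fcsOr, ih]
          | some v =>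
            by_cases hv : v ∈ expected <;> by_cases hg : v = fcsGlass <;>
              cases a <;> cases c <;> simp_all [fcsOr, ih]

theorem fcsFind1_empty (items : List (Int × List (String × String))) (reserved : List Int)
    (L : List Int) : L.find? (fcsP1 items reserved []) = none := by
  rw [List.find?_eq_none]
  intro s _
  simp only [fcsP1]
  cases fcsGet? items s with
  | none => simp
  | some it => cases fcsGet? it "id" <;> simp

-- ===== VERDICT (by name: the statement is the Claim_ definition above) =====
theorem find_candidate_slot_v2_spec : Claim_equal_find_candidate_slot_v2 := by
  intro items base_slot reserved mode max_row _
  unfold Spec_find_candidate_slot_v2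
  unfold find_candidate_slot_v2 find_candidate_slot_v2_alt
  rw [fcsFoldl_eq, fcsLoop1_eq_find, fcsLoop2_eq_find, fcsLoop3_eq_find]
  by_cases hE : (fcsExpected mode).isEmpty
  · have h0 : fcsExpected mode = [] := List.isEmpty_iff.mp hE
    rw [h0, fcsFind1_empty]
    simp only [hE, if_true, fcsOr, if_pos]
    cases (fcsNeighbors base_slot max_row).find? (fcsP2 items reserved) <;> simp [fcsOr]
  · simp only [hE, Bool.false_eq_true, if_false, fcsOr]
    cases (fcsNeighbors base_slot max_row).find? (fcsP1 items reserved (fcsExpected mode)) <;>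
      cases (fcsNeighbors base_slot max_row).find? (fcsP2 items reserved) <;> simp
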